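-- pv_equiv track=rewrite | github.com/danieljhkim/DataStructures-Algorithms | python/algorithms/array/basic/operations.py | right_shift_vals
-- ===== SOURCE A (Python) =====
-- def right_shift_vals(arr, val):
--     """_summary_
--     shifts all occurences of val to the right, while maintaining original sequence
--
--     Args:
--         val (_type_): value to be shifted
--     """
--     N = len(arr)
--     val_idx = 0
--
--     for i in range(N):
--         if arr[i] != val:
--             arr[val_idx] = arr[i]
--             val_idx += 1
--
--     for i in range(val_idx, N):
--         arr[i] = val
--
--     return arr
-- ===== SOURCE B (Python) =====
-- def right_shift_vals(arr, val):
--     """Shift all occurrences of val to the right, keeping the other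
--     elements in their original order (mutates arr in place, returns it).
--
--     Uses Python's stable sort with a boolean key: non-val elements (key
--     False) keep their relative order and come before all vals (key True).
--     """
--     arr.sort(key=lambda x: x == val)
--     return arr
-- ===== Notes on version B (the rewrite author's own statement) =====
-- stated objective: idiomatic
-- what changed: Replaces A's two-pointer compact-then-fill index loops with a single stable sort keyed on the boolean x == val, which by stability keeps non-val elements in order and moves all vals to the end.
import Mathlib
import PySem

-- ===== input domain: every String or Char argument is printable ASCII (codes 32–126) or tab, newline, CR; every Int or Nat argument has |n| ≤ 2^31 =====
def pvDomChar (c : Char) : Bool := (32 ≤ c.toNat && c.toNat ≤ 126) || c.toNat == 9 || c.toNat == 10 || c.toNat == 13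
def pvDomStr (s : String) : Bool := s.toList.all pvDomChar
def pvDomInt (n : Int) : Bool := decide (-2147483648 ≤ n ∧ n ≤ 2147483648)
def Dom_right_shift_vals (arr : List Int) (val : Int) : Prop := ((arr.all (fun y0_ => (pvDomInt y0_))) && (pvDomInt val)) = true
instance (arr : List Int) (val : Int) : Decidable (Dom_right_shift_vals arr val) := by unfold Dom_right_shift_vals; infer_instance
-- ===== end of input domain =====

-- B replaces A's two-pointer compact-then-fill loops with one stable sort keyed on
-- the boolean x == val; equivalence is about the returned value (both Pythons
-- mutate arr in place and return it with the same final contents).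

-- ===== PORT A =====
-- Literal port of A: a mutable list plus val_idx, two index loops.
-- arr[i] and arr[val_idx] = … use indices that are always ≥ 0 and < len(arr)
-- (val_idx ≤ i < N and set preserves length), so pyGetD …0 and List.set i.toNat are exact.
def right_shift_vals (arr : List Int) (val : Int) : List Int :=
  let N : Int := arr.length
  let s := (PySem.List.pyRange 0 N 1).foldl
    (fun (st : List Int × Int) i =>
      if PySem.List.pyGetD st.1 i 0 ≠ val then
        (st.1.set st.2.toNat (PySem.List.pyGetD st.1 i 0), st.2 + 1)
      else st) (arr, 0)
  (PySem.List.pyRange s.2 N 1).foldl (fun a i => a.set i.toNat val) s.1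

-- ===== PORT B =====
-- arr.sort(key=lambda x: x == val): PySem.List.sorted is Python's stable sort;
-- the bool key (False < True) is modelled exactly by the Int key 0/1.
def right_shift_vals_alt (arr : List Int) (val : Int) : List Int :=
  PySem.List.sorted arr (fun x => if x = val then (1 : Int) else 0)

-- ===== PRECONDITION & SPEC =====
def Spec_right_shift_vals (arr : List Int) (val : Int) (out : List Int) : Prop := out = right_shift_vals_alt arr val
instance (arr : List Int) (val : Int) (out : List Int) : Decidable (Spec_right_shift_vals arr val out) := by unfold Spec_right_shift_vals; infer_instance

-- ===== CLAIM (what is proved, stated in full; the proofs are below) =====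
def Claim_equal_right_shift_vals : Prop := ∀ (arr : List Int) (val : Int), Dom_right_shift_vals arr val → Spec_right_shift_vals arr val (right_shift_vals arr val)

-- ===== LEMMAS AND PROOFS =====

-- First loop of A: scanning `rest` with kept prefix `keptL` (val_idx = keptL.length)
-- and a garbage middle segment `mid` compacts the ≠val elements of `rest` behind keptL.
lemma rsv_loop1 (val : Int) : ∀ (rest mid keptL : List Int),
    ∃ junk : List Int,
      (PySem.List.pyRange ((keptL.length + mid.length : Nat) : Int)
          ((keptL.length + mid.length + rest.length : Nat) : Int) 1).foldl
        (fun (st : List Int × Int) i =>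
          if PySem.List.pyGetD st.1 i 0 ≠ val then
            (st.1.set st.2.toNat (PySem.List.pyGetD st.1 i 0), st.2 + 1)
          else st) (keptL ++ mid ++ rest, (keptL.length : Int))
      = (keptL ++ rest.filter (fun x => x ≠ val) ++ junk,
         ((keptL.length + (rest.filter (fun x => x ≠ val)).length : Nat) : Int))
      ∧ keptL.length + (rest.filter (fun x => x ≠ val)).length + junk.length
          = keptL.length + mid.length + rest.length := by
  intro rest
  induction rest with
  | nil =>
      intro mid keptL
      refine ⟨mid, ?_, by simp⟩
      rw [PySem.List.pyRange_one_eq_nil (by simp)]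
      simp
  | cons x rest' ih =>
      intro mid keptL
      have hlt : ((keptL.length + mid.length : Nat) : Int)
          < ((keptL.length + mid.length + (x :: rest').length : Nat) : Int) := by
        have h : keptL.length + mid.length
            < keptL.length + mid.length + (x :: rest').length := by simp
        exact_mod_cast h
      rw [PySem.List.pyRange_one_cons hlt]
      have hread : PySem.List.pyGetD (keptL ++ mid ++ (x :: rest'))
          ((keptL.length + mid.length : Nat) : Int) 0 = x := by
        rw [PySem.List.pyGetD_natCast]
        rw [List.getD_eq_getElem?_getD, List.append_assoc,
          List.getElem?_append_right (by simp)]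
        simp
      simp only [List.foldl_cons, hread]
      by_cases hx : x = val
      · -- skip: value equals val, state unchanged
        simp only [hx, ne_eq, not_true_eq_false, if_false]
        obtain ⟨junk, h1, h2⟩ := ih (mid ++ [val]) keptL
        refine ⟨junk, ?_, ?_⟩
        · push_cast at h1 ⊢
          simpa [List.append_assoc, List.filter_cons,
            add_comm, add_left_comm, add_assoc] using h1
        · simp at h2 ⊢; omega
      · -- keep: write x at val_idx, advance
        simp only [ne_eq, hx, not_false_eq_true, if_true]
        have hset : (keptL ++ mid ++ (x :: rest')).set
            ((keptL.length : Int)).toNat x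
            = keptL ++ ((mid ++ (x :: rest')).set 0 x) := by
          rw [List.append_assoc]
          simp [List.set_append]
        obtain ⟨mid2, hm2len, hm2⟩ :
            ∃ mid2 : List Int, mid2.length = mid.length
              ∧ (mid ++ (x :: rest')).set 0 x = x :: (mid2 ++ rest') := by
          cases mid with
          | nil => exact ⟨[], rfl, by simp⟩
          | cons m mid' => exact ⟨mid' ++ [x], by simp, by simp⟩
        obtain ⟨junk, h1, h2⟩ := ih mid2 (keptL ++ [x])
        refine ⟨junk, ?_, ?_⟩
        · rw [hset, hm2]
          push_cast [hm2len] at h1 ⊢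
          simpa [List.append_assoc, List.filter_cons, hx,
            add_comm, add_left_comm, add_assoc] using h1
        · simp [hx, hm2len] at h2 ⊢; omega

-- Second loop of A: overwriting indices |pre| … |pre|+|junk| with val.
lemma rsv_loop2 (val : Int) : ∀ (junk pre : List Int),
    (PySem.List.pyRange ((pre.length : Nat) : Int)
        ((pre.length + junk.length : Nat) : Int) 1).foldl
      (fun (a : List Int) i => a.set i.toNat val) (pre ++ junk)
    = pre ++ List.replicate junk.length val := by
  intro junk
  induction junk with
  | nil =>
      intro pre
      rw [PySem.List.pyRange_one_eq_nil (by simp)]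
      simp
  | cons j junk' ih =>
      intro pre
      rw [PySem.List.pyRange_one_cons (by simp)]
      simp only [List.foldl_cons]
      have hset : (pre ++ (j :: junk')).set ((pre.length : Int)).toNat val
          = (pre ++ [val]) ++ junk' := by
        simp
      rw [hset]
      have := ih (pre ++ [val])
      have hb : ((pre ++ [val]).length : Int) = (pre.length : Int) + 1 := by simp
      have hb2 : (((pre ++ [val]).length + junk'.length : Nat) : Int)
          = ((pre.length + (j :: junk').length : Nat) : Int) := by simp; ring
      rw [hb, hb2] at this
      rw [this]
      simp [List.replicate_succ, List.append_assoc]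

-- Inserting a non-val element x into kept ++ replicate n val lands right after kept.
lemma rsv_insert_ne (val x : Int) (hx : x ≠ val) : ∀ (kept : List Int),
    (∀ k ∈ kept, k ≠ val) → ∀ (n : Nat),
    PySem.List.insertBy
      (fun a b => decide ((if a = val then (1 : Int) else 0) < (if b = val then (1 : Int) else 0)))
      x (kept ++ List.replicate n val)
    = kept ++ x :: List.replicate n val := by
  intro kept
  induction kept with
  | nil =>
      intro _ n
      cases n with
      | zero => simp [PySem.List.insertBy]
      | succ m => simp [List.replicate_succ, PySem.List.insertBy, hx]
  | cons k kept' ih =>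
      intro hk n
      have hkne : k ≠ val := hk k (by simp)
      simp only [List.cons_append, PySem.List.insertBy, hx, hkne]
      rw [ih (fun a ha => hk a (by simp [ha])) n]
      simp

-- Inserting val itself appends it at the very end (stability on equal keys).
lemma rsv_insert_eq (val : Int) (kept : List Int) (n : Nat) :
    PySem.List.insertBy
      (fun a b => decide ((if a = val then (1 : Int) else 0) < (if b = val then (1 : Int) else 0)))
      val (kept ++ List.replicate n val)
    = kept ++ List.replicate (n + 1) val := by
  rw [PySem.List.insertBy_of_forall_not_before]
  · rw [List.append_assoc, ← List.replicate_succ']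
  · intro y _
    simp only [decide_eq_false_iff_not, not_lt]
    split_ifs <;> simp

-- The insertion-sort fold with the 0/1 key keeps the invariant
-- acc = (non-vals seen so far, in order) ++ (vals seen so far).
lemma rsv_sort_loop (val : Int) : ∀ (xs kept : List Int) (n : Nat),
    (∀ k ∈ kept, k ≠ val) →
    xs.foldl (fun acc x => PySem.List.insertBy
        (fun a b => decide ((if a = val then (1 : Int) else 0) < (if b = val then (1 : Int) else 0)))
        x acc) (kept ++ List.replicate n val)
    = (kept ++ xs.filter (fun x => x ≠ val))
        ++ List.replicate (n + (xs.filter (fun x => x = val)).length) val := by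
  intro xs
  induction xs with
  | nil => intro kept n _; simp
  | cons x xs' ih =>
      intro kept n hk
      simp only [List.foldl_cons]
      by_cases hx : x = val
      · subst hx
        rw [rsv_insert_eq]
        rw [ih kept (n + 1) hk]
        simp only [List.filter_cons]
        simp [add_comm, add_left_comm, add_assoc]
      · rw [rsv_insert_ne val x hx kept hk n]
        have : kept ++ x :: List.replicate n val = (kept ++ [x]) ++ List.replicate n val := by
          simp
        rw [this, ih (kept ++ [x]) n (by
          intro a ha
          rcases List.mem_append.mp ha with h | h
          · exact hk a h
          · simp at h; subst h; exact hx)]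
        simp [List.filter_cons, hx, List.append_assoc]

-- Counting: vals plus non-vals account for the whole list.
lemma rsv_count (val : Int) : ∀ (xs : List Int),
    (xs.filter (fun x => decide (x = val))).length
      + (xs.filter (fun x => !decide (x = val))).length = xs.length := by
  intro xs
  induction xs with
  | nil => simp
  | cons x xs' ih =>
      by_cases hx : x = val <;> simp [List.filter_cons, hx] <;> omega

-- ===== VERDICT (by name: the statement is the Claim_ definition above) =====
theorem right_shift_vals_spec : Claim_equal_right_shift_vals := by
  intro arr val _
  unfold Spec_right_shift_vals right_shift_vals right_shift_vals_alt
  -- evaluate B: sorted = insertion fold = filter ++ replicate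
  rw [PySem.List.sorted_eq_foldl_insertBy]
  have hB := rsv_sort_loop val arr [] 0 (by simp)
  simp only [List.nil_append, List.replicate_zero, List.append_nil, Nat.zero_add] at hB
  rw [hB]
  -- evaluate A via the two loop lemmas
  obtain ⟨junk, h1, h2⟩ := rsv_loop1 val arr [] []
  simp only [List.length_nil, List.nil_append, Nat.zero_add, Nat.cast_zero,
    ne_eq, decide_not] at h1 h2
  simp only [ne_eq, decide_not]
  rw [show ((arr.length : Nat) : Int) = ((0 + 0 + arr.length : Nat) : Int) by simp] at h1 ⊢
  rw [h1]
  have hcount := rsv_count val arr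
  have hjunk : junk.length = (arr.filter (fun x => decide (x = val))).length := by
    omega
  have := rsv_loop2 val junk (arr.filter (fun x => !decide (x = val)))
  have hb : (((arr.filter (fun x => !decide (x = val))).length + junk.length : Nat) : Int)
      = ((0 + 0 + arr.length : Nat) : Int) := by simp; omega
  rw [hb] at this
  rw [this, hjunk]
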